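-- pv_equiv track=rewrite | github.com/raffmiceli/Project_Euler | Problem 103.py | isSpeciaSumSet
-- ===== SOURCE A (Python) =====
-- from itertools import combinations
--
-- def isSpeciaSumSet(s):
--     uSet = set(s)
--     for i in range(2,len(s)):
--         maxSet = max(uSet)
--         for a in combinations(s, i):
--             ss = sum(a)
--             if ss <= maxSet or ss in uSet: return False
--             else: uSet.add(ss)
--     return True
-- ===== SOURCE B (Python) =====
-- from itertools import combinations
--
-- def isSpeciaSumSet(s):
--     n = len(s)
--     if n < 3:
--         return True
--     t = sorted(s)
--     # monotonicity in closed form: the smallest size-i combination sum is the sum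
--     # of the i smallest elements, the largest the sum of the i largest, so no
--     # combinations need to be enumerated for this check at all
--     running = t[-1]
--     lo = t[0] + t[1]
--     hi = t[-1] + t[-2]
--     for i in range(2, n):
--         if lo <= running:
--             return False
--         running = hi
--         lo += t[i]
--         hi += t[n - i - 1]
--     # distinctness: distinct elements plus every combination sum, one global check
--     pool = list(set(s))
--     for i in range(2, n):
--         pool += [sum(c) for c in combinations(s, i)]
--     return len(set(pool)) == len(pool)
-- ===== Notes on version B (the rewrite author's own statement) =====
-- stated objective: alternative
-- what changed: A fuses everything into one per-combination loop that tests and mutates a seen-set and early-returns per sum; B keeps no seen-set at all: it sorts the list once and verifies monotonicity in closed form (the smallest/largest size-i combination sum is the sum of the i smallest/largest elements, maintained incrementally), enumerating no combinations for that check, then verifies distinctness once globally by pooling the distinct elements with all combination sums and comparing len(set(pool)) to len(pool).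
import Mathlib
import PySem

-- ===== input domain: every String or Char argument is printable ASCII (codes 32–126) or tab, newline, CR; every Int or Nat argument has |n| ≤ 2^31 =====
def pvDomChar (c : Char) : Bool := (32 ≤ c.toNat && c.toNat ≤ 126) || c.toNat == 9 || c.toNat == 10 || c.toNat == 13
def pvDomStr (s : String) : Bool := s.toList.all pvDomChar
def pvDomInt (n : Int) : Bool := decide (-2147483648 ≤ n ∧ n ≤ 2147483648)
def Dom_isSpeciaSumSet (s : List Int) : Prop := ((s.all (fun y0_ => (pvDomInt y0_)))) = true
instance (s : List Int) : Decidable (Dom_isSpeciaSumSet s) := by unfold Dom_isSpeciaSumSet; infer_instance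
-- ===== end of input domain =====

-- ===== PORT A =====
-- B replaces A's fused per-combination loop (which tests and mutates a seen-set) by a
-- closed-form monotonicity pass on the sorted list — the smallest/largest size-i
-- combination sum is the sum of the i smallest/largest elements, so no combinations
-- are enumerated for that check — followed by one global distinctness check on the
-- pooled sums; objective: alternative algorithm (closed form vs enumeration there).

-- inner loop of A: 'for a in combinations(s, i): …' with early return, threading uSet
def aInner (maxSet : Int) (u : PySem.Set Int) (cs : List (List Int)) : Option (PySem.Set Int) :=
  match cs with
  | [] => some u
  | a :: rest =>
    let ss := a.sum
    if ss ≤ maxSet || PySem.Set.contains u ss then none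
    else aInner maxSet (PySem.Set.add u ss) rest

-- outer loop of A: 'for i in range(2, len(s))'; u is nonempty whenever a loop body
-- runs (len(s) ≥ 3), so the .getD 0 total form of max(uSet) never falls to its default
def aOuter (s : List Int) (u : PySem.Set Int) (is_ : List Int) : Bool :=
  match is_ with
  | [] => true
  | i :: rest =>
    let maxSet := (PySem.List.max? u (fun x => x)).getD 0
    match aInner maxSet u (PySem.List.combinations s i.toNat) with
    | none => false
    | some u' => aOuter s u' rest

def isSpeciaSumSet (s : List Int) : Bool :=
  aOuter s (PySem.Set.ofList s) (PySem.List.pyRange 2 s.length)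

-- ===== PORT B =====
-- 't = sorted(s)' of Source B
def bSorted (s : List Int) : List Int := PySem.List.sorted s (fun x => x) false

-- monotonicity loop of Source B: 'if lo <= running: return False; running = hi;
-- lo += t[i]; hi += t[n - i - 1]'.  t[j] is Python indexing; every index used is in
-- range (2 ≤ i < n = len(t)), so the .getD 0 total form of pyGet? is exact here
def bMono (t : List Int) (nn running lo hi : Int) (is_ : List Int) : Bool :=
  match is_ with
  | [] => true
  | i :: rest =>
    if lo ≤ running then false
    else bMono t nn hi (lo + (PySem.List.pyGet? t i).getD 0)
           (hi + (PySem.List.pyGet? t (nn - i - 1)).getD 0) rest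

-- pool loop of Source B: 'pool = list(set(s)); for i in range(2, n): pool += [sum(c) …]'
def bPool (s : List Int) : List Int :=
  (PySem.List.pyRange 2 (s.length : Int)).foldl
    (fun pool i => pool ++ (PySem.List.combinations s i.toNat).map List.sum)
    (PySem.Set.ofList s)

def isSpeciaSumSet_alt (s : List Int) : Bool :=
  if s.length < 3 then true
  else if !(bMono (bSorted s) (s.length : Int)
        ((PySem.List.pyGet? (bSorted s) (-1)).getD 0)
        ((PySem.List.pyGet? (bSorted s) 0).getD 0 + (PySem.List.pyGet? (bSorted s) 1).getD 0)
        ((PySem.List.pyGet? (bSorted s) (-1)).getD 0 + (PySem.List.pyGet? (bSorted s) (-2)).getD 0)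
        (PySem.List.pyRange 2 (s.length : Int))) then false
  else (PySem.Set.ofList (bPool s)).length == (bPool s).length

-- ===== PRECONDITION & SPEC =====
def Spec_isSpeciaSumSet (s : List Int) (out : Bool) : Prop := out = isSpeciaSumSet_alt s
instance (s : List Int) (out : Bool) : Decidable (Spec_isSpeciaSumSet s out) := by unfold Spec_isSpeciaSumSet; infer_instance

-- ===== CLAIM (what is proved, stated in full; the proofs are below) =====
def Claim_equal_isSpeciaSumSet : Prop := ∀ (s : List Int), Dom_isSpeciaSumSet s → Spec_isSpeciaSumSet s (isSpeciaSumSet s)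

-- ===== LEMMAS AND PROOFS =====

-- proof-layer spec of the monotonicity phase over the table of per-size sums:
-- per size, only min and max of the size's sums matter
def sMono (running : Int) (tbl : List (List Int)) : Bool :=
  match tbl with
  | [] => true
  | sums :: rest =>
    if (PySem.List.min? sums (fun x => x)).getD 0 ≤ running then false
    else sMono ((PySem.List.max? sums (fun x => x)).getD 0) rest

-- A's inner early-return loop, characterised wholesale: it succeeds exactly when every
-- sum exceeds maxSet and is fresh (w.r.t. u and the other sums), producing u.update(sums)
lemma aInner_eq_some (m : Int) (u : PySem.Set Int) (cs : List (List Int))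
    (h1 : ∀ x ∈ cs.map List.sum, m < x ∧ x ∉ u) (h2 : (cs.map List.sum).Nodup) :
    aInner m u cs = some (PySem.Set.update u (cs.map List.sum)) := by
  induction cs generalizing u with
  | nil => simp [aInner, PySem.Set.update]
  | cons a rest ih =>
    simp only [List.map_cons, List.nodup_cons, List.mem_cons] at h1 h2
    obtain ⟨hm, hu⟩ := h1 a.sum (Or.inl rfl)
    have hcond : (decide (a.sum ≤ m) || PySem.Set.contains u a.sum) = false := by
      simp [hu]; omega
    simp only [aInner, hcond, Bool.false_eq_true, if_false]
    rw [ih]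
    · simp only [List.map_cons, PySem.Set.update_cons]
    · intro x hx
      refine ⟨(h1 x (Or.inr hx)).1, ?_⟩
      rw [PySem.Set.mem_add]
      push_neg
      exact ⟨(h1 x (Or.inr hx)).2, fun hxa => h2.1 (hxa ▸ hx)⟩
    · exact h2.2

lemma aInner_eq_none (m : Int) (u : PySem.Set Int) (cs : List (List Int))
    (h : ¬ ((∀ x ∈ cs.map List.sum, m < x ∧ x ∉ u) ∧ (cs.map List.sum).Nodup)) :
    aInner m u cs = none := by
  induction cs generalizing u with
  | nil => simp at h
  | cons a rest ih =>
    by_cases hbad : a.sum ≤ m ∨ a.sum ∈ u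
    · have : (decide (a.sum ≤ m) || PySem.Set.contains u a.sum) = true := by
        simp; tauto
      simp only [aInner, this, if_true]
    · push_neg at hbad
      have hcond : (decide (a.sum ≤ m) || PySem.Set.contains u a.sum) = false := by
        simp [hbad.2]; omega
      simp only [aInner, hcond, Bool.false_eq_true, if_false]
      apply ih
      intro ⟨c1, c2⟩
      apply h
      constructor
      · intro x hx
        simp only [List.map_cons, List.mem_cons] at hx
        rcases hx with rfl | hx
        · exact ⟨hbad.1, hbad.2⟩
        · have := c1 x hx
          rw [PySem.Set.mem_add] at this
          push_neg at this
          exact ⟨this.1, this.2.1⟩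
      · simp only [List.map_cons, List.nodup_cons]
        refine ⟨fun hmem => ?_, c2⟩
        have := (c1 _ hmem).2
        rw [PySem.Set.mem_add] at this
        push_neg at this
        exact this.2 rfl

-- max over a nonempty list, in the total .getD 0 form: membership and upper bound
lemma maxD_spec (l : List Int) (h : l ≠ []) :
    (PySem.List.max? l (fun x => x)).getD 0 ∈ l ∧
    ∀ y ∈ l, y ≤ (PySem.List.max? l (fun x => x)).getD 0 := by
  obtain ⟨m, hm⟩ : ∃ m, PySem.List.max? l (fun x => x) = some m := by
    cases hc : PySem.List.max? l (fun x => x) with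
    | none => exact absurd ((PySem.List.max?_eq_none_iff _ _).mp hc) h
    | some m => exact ⟨m, rfl⟩
  rw [hm]
  exact ⟨PySem.List.max?_mem hm, fun y hy => PySem.List.max?_isMax hm y hy⟩

-- min over a nonempty list, same total form
lemma minD_spec (l : List Int) (h : l ≠ []) :
    (PySem.List.min? l (fun x => x)).getD 0 ∈ l ∧
    ∀ y ∈ l, (PySem.List.min? l (fun x => x)).getD 0 ≤ y := by
  obtain ⟨m, hm⟩ : ∃ m, PySem.List.min? l (fun x => x) = some m := by
    cases hc : PySem.List.min? l (fun x => x) with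
    | none => exact absurd ((PySem.List.min?_eq_none_iff _ _).mp hc) h
    | some m => exact ⟨m, rfl⟩
  rw [hm]
  exact ⟨PySem.List.min?_mem hm, fun y hy => PySem.List.min?_isMin hm y hy⟩

-- the .getD 0 max takes the same value on any two nonempty lists with the same members
lemma maxD_congr (l l' : List Int) (h : l ≠ []) (h' : l' ≠ [])
    (hm : ∀ x, x ∈ l ↔ x ∈ l') :
    (PySem.List.max? l (fun x => x)).getD 0 = (PySem.List.max? l' (fun x => x)).getD 0 := by
  obtain ⟨m1, u1⟩ := maxD_spec l h
  obtain ⟨m2, u2⟩ := maxD_spec l' h'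
  have := u2 _ ((hm _).mp m1)
  have := u1 _ ((hm _).mpr m2)
  omega

-- when every new element is fresh, Python's set.update is plain concatenation
lemma update_eq_append (u : PySem.Set Int) (xs : List Int)
    (hnd : xs.Nodup) (hf : ∀ x ∈ xs, x ∉ u) :
    PySem.Set.update u xs = u ++ xs := by
  induction xs generalizing u with
  | nil => simp [PySem.Set.update]
  | cons a rest ih =>
    rw [PySem.Set.update_cons, PySem.Set.add_eq_ite,
        if_neg (hf a List.mem_cons_self), ih]
    · simp
    · exact hnd.of_cons
    · intro x hx
      rw [List.mem_append]
      rintro (hxu | hxa)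
      · exact hf x (List.mem_cons_of_mem a hx) hxu
      · rw [List.mem_singleton] at hxa
        exact (List.nodup_cons.mp hnd).1 (hxa ▸ hx)

-- after a passing stage all new sums dominate u, so max(u ++ sums) = max(sums)
lemma maxD_append (u sums : List Int) (hu : u ≠ []) (hs : sums ≠ [])
    (h : ∀ x ∈ sums, (PySem.List.max? u (fun x => x)).getD 0 < x) :
    (PySem.List.max? (u ++ sums) (fun x => x)).getD 0
      = (PySem.List.max? sums (fun x => x)).getD 0 := by
  obtain ⟨hwmem, hwmax⟩ := maxD_spec (u ++ sums) (by simp [hu])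
  obtain ⟨hsmem, hsmax⟩ := maxD_spec sums hs
  obtain ⟨humem, humax⟩ := maxD_spec u hu
  have hle := hwmax _ (List.mem_append_right u hsmem)
  rcases List.mem_append.mp hwmem with hin | hin
  · have h1 := humax _ hin
    have h2 := h _ hsmem
    omega
  · have := hsmax _ hin
    omega

-- the pool loop is the initial pool followed by the flattened table
lemma foldl_append_eq_flatten (init : List Int) (tbl : List (List Int)) :
    tbl.foldl (fun pool sums => pool ++ sums) init = init ++ tbl.flatten := by
  induction tbl generalizing init with
  | nil => simp
  | cons t rest ih => simp [ih]

-- set(xs) keeps a subsequence of xs …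
lemma ofList_sublist (xs : List Int) : (PySem.Set.ofList xs).Sublist xs := by
  induction xs using List.reverseRecOn with
  | nil => simp [PySem.Set.ofList_nil]
  | append_singleton ys y ih =>
    rw [PySem.Set.ofList_append_singleton, PySem.Set.add_eq_ite]
    split
    · exact ih.trans (List.sublist_append_left ys [y])
    · exact ih.append (List.Sublist.refl [y])

-- … so len(set(xs)) == len(xs) detects exactly the duplicate-free lists
lemma poolCheck_eq_nodup (xs : List Int) :
    ((PySem.Set.ofList xs).length == xs.length) = decide xs.Nodup := by
  by_cases h : xs.Nodup
  · rw [PySem.Set.ofList_eq_self_of_nodup xs h]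
    simp [h]
  · have hne : (PySem.Set.ofList xs).length ≠ xs.length := by
      intro hlen
      exact h (((ofList_sublist xs).eq_of_length hlen) ▸ PySem.Set.nodup_ofList xs)
    simp [h, hne]

-- crux 1: A's fused loop equals 'aggregate monotonicity over the table, then one
-- global duplicate check on everything accumulated'
lemma loop_eq (s : List Int) (is_ : List Int) (u : PySem.Set Int)
    (hnd : u.Nodup) (hu : u ≠ [])
    (hcne : ∀ i ∈ is_, (PySem.List.combinations s i.toNat).map List.sum ≠ []) :
    aOuter s u is_ =
      (sMono ((PySem.List.max? u (fun x => x)).getD 0)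
          (is_.map (fun i => (PySem.List.combinations s i.toNat).map List.sum))
        && decide ((is_.map (fun i => (PySem.List.combinations s i.toNat).map List.sum)).foldl
            (fun pool sums => pool ++ sums) u).Nodup) := by
  induction is_ generalizing u with
  | nil => simp [aOuter, sMono, hnd]
  | cons i rest ih =>
    have hsne : (PySem.List.combinations s i.toNat).map List.sum ≠ [] :=
      hcne i List.mem_cons_self
    obtain ⟨humem, humax⟩ := maxD_spec u hu
    obtain ⟨hminmem, hminmin⟩ :=
      minD_spec ((PySem.List.combinations s i.toNat).map List.sum) hsne
    simp only [List.map_cons, List.foldl_cons, aOuter]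
    by_cases hlow : ∃ x ∈ (PySem.List.combinations s i.toNat).map List.sum,
        x ≤ (PySem.List.max? u (fun x => x)).getD 0
    · -- a sum fails the monotonicity bar: A's inner loop aborts, the min test fails
      obtain ⟨x, hx, hxle⟩ := hlow
      rw [aInner_eq_none _ _ _ (by
        intro ⟨hall, _⟩
        exact absurd hxle (by have := (hall x hx).1; omega))]
      simp only [sMono, if_pos (le_trans (hminmin x hx) hxle), Bool.false_and]
    · push_neg at hlow
      have hfresh : ∀ x ∈ (PySem.List.combinations s i.toNat).map List.sum, x ∉ u := by
        intro x hx hxu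
        exact absurd (humax x hxu) (by have := hlow x hx; omega)
      have hmgt : ¬ ((PySem.List.min? ((PySem.List.combinations s i.toNat).map List.sum)
          (fun x => x)).getD 0 ≤ (PySem.List.max? u (fun x => x)).getD 0) := by
        have := hlow _ hminmem; omega
      by_cases hsnd : ((PySem.List.combinations s i.toNat).map List.sum).Nodup
      · -- the stage passes both checks: recurse with the common new state u ++ sums
        rw [aInner_eq_some _ _ _ (fun x hx => ⟨hlow x hx, hfresh x hx⟩) hsnd,
            update_eq_append u _ hsnd hfresh]
        have hred : (match some (u ++ (PySem.List.combinations s i.toNat).map List.sum) with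
            | none => false
            | some u' => aOuter s u' rest)
            = aOuter s (u ++ (PySem.List.combinations s i.toNat).map List.sum) rest := rfl
        rw [hred]
        rw [ih (u ++ (PySem.List.combinations s i.toNat).map List.sum)
              (hnd.append hsnd (fun x hx hx' => hfresh x hx' hx))
              (by simp [hu]) (fun j hj => hcne j (List.mem_cons_of_mem i hj))]
        rw [maxD_append u _ hu hsne hlow]
        simp only [sMono, if_neg hmgt]
        rfl
      · -- duplicate sums within the stage: A aborts, the pooled list has a repeat
        rw [aInner_eq_none _ _ _ (fun ⟨_, hnd'⟩ => hsnd hnd')]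
        have hpool : ¬ (u ++ ((PySem.List.combinations s i.toNat).map List.sum
            ++ (rest.map (fun i => (PySem.List.combinations s i.toNat).map List.sum)).flatten)).Nodup :=
          fun hpn => hsnd (List.Nodup.of_append_left (List.Nodup.of_append_right hpn))
        simp [foldl_append_eq_flatten, hpool]

-- splitting a subperm of a :: t: either a is unused, or it is one of c's elements
lemma subperm_cons_decomp (c : List Int) (a : Int) (t : List Int)
    (h : List.Subperm c (a :: t)) :
    List.Subperm c t ∨ ∃ c', c.Perm (a :: c') ∧ List.Subperm c' t := by
  by_cases ha : a ∈ c
  · right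
    refine ⟨c.erase a, List.perm_cons_erase ha, ?_⟩
    have := List.Subperm.erase a h
    simpa using this
  · left
    rw [← Multiset.coe_le] at h ⊢
    rwa [← Multiset.cons_coe, Multiset.le_cons_of_notMem (by simpa using ha)] at h

-- any i elements of a sorted list sum to at least the first i of them
lemma take_sum_le (t : List Int) (hp : t.Pairwise (· ≤ ·)) (c : List Int)
    (h : List.Subperm c t) : (t.take c.length).sum ≤ c.sum := by
  induction t generalizing c with
  | nil =>
    have hc : c = [] := List.eq_nil_of_length_eq_zero (Nat.le_zero.mp (by simpa using h.length_le))
    simp [hc]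
  | cons a t ih =>
    cases c with
    | nil => simp
    | cons b cs =>
      rcases subperm_cons_decomp _ _ _ h with h1 | ⟨c', hperm, h2⟩
      · have hlt : cs.length < t.length := by simpa using h1.length_le
        have ihc := ih hp.of_cons _ h1
        have hst := List.sum_take_succ t cs.length hlt
        have haa : a ≤ t[cs.length] := (List.pairwise_cons.mp hp).1 _ (List.getElem_mem hlt)
        simp only [List.length_cons, List.take_succ_cons, List.sum_cons] at *
        omega
      · have hsum : b + cs.sum = a + c'.sum := by
          have := hperm.sum_eq; simpa using this
        have hlen : cs.length = c'.length := by
          have := hperm.length_eq; simpa using this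
        have ihc := ih hp.of_cons c' h2
        simp only [List.length_cons, List.take_succ_cons, List.sum_cons]
        rw [hlen]
        omega

lemma sum_map_neg (l : List Int) : (l.map (fun x => -x)).sum = -l.sum := by
  induction l with
  | nil => simp
  | cons a t ih => simp only [List.map_cons, List.sum_cons, ih]; ring

-- dually, any i elements of a sorted list sum to at most the last i of them
lemma sum_le_drop (t : List Int) (hp : t.Pairwise (· ≤ ·)) (c : List Int)
    (h : List.Subperm c t) : c.sum ≤ (t.drop (t.length - c.length)).sum := by
  have hp' : ((t.map (fun x => -x)).reverse).Pairwise (· ≤ ·) := by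
    rw [List.pairwise_reverse, List.pairwise_map]
    exact hp.imp (fun hab => by omega)
  have hsub : List.Subperm (c.map (fun x => -x)) ((t.map (fun x => -x)).reverse) := by
    have h1 := List.Subperm.map (f := fun x : Int => -x)
      (fun a b hab => by dsimp at hab; omega) h
    exact h1.trans (List.reverse_perm _).symm.subperm
  have hk := take_sum_le _ hp' _ hsub
  rw [List.length_map, List.take_reverse, List.sum_reverse, ← List.map_drop,
      sum_map_neg, sum_map_neg, List.length_map] at hk
  omega

-- the smallest size-i combination sum is the sum of the i smallest elements …
lemma minD_comb (s t : List Int) (ht : t.Perm s) (hp : t.Pairwise (· ≤ ·))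
    (i : Nat) (hin : i ≤ s.length) :
    (PySem.List.min? ((PySem.List.combinations s i).map List.sum) (fun x => x)).getD 0
      = (t.take i).sum := by
  have hlen : t.length = s.length := ht.length_eq
  have hwit : s.take i ∈ PySem.List.combinations s i := by
    rw [PySem.List.mem_combinations_iff]
    exact ⟨List.take_sublist _ _, by simp [hin]⟩
  have hne : (PySem.List.combinations s i).map List.sum ≠ [] := by
    intro hnil
    rw [List.map_eq_nil_iff] at hnil
    simp [hnil] at hwit
  obtain ⟨hmem, hmin⟩ := minD_spec _ hne
  obtain ⟨c, hc, hcs⟩ := List.mem_map.mp hmem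
  obtain ⟨hcsub, hclen⟩ := (PySem.List.mem_combinations_iff _ _ _).mp hc
  have hup : (t.take i).sum ≤ (PySem.List.min?
      ((PySem.List.combinations s i).map List.sum) (fun x => x)).getD 0 := by
    have := take_sum_le t hp c (hcsub.subperm.trans ht.symm.subperm)
    rw [hclen] at this
    omega
  have hlo : (PySem.List.min? ((PySem.List.combinations s i).map List.sum)
      (fun x => x)).getD 0 ≤ (t.take i).sum := by
    obtain ⟨d, hdp, hds⟩ := (List.take_sublist i t).subperm.trans ht.subperm
    have hd : d ∈ PySem.List.combinations s i := by
      rw [PySem.List.mem_combinations_iff]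
      exact ⟨hds, by rw [hdp.length_eq, List.length_take]; omega⟩
    have : d.sum ∈ (PySem.List.combinations s i).map List.sum := List.mem_map_of_mem hd
    have := hmin _ this
    rw [hdp.sum_eq] at this
    exact this
  omega

-- … and the largest is the sum of the i largest elements
lemma maxD_comb (s t : List Int) (ht : t.Perm s) (hp : t.Pairwise (· ≤ ·))
    (i : Nat) (hin : i ≤ s.length) :
    (PySem.List.max? ((PySem.List.combinations s i).map List.sum) (fun x => x)).getD 0
      = (t.drop (t.length - i)).sum := by
  have hlen : t.length = s.length := ht.length_eq
  have hwit : s.take i ∈ PySem.List.combinations s i := by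
    rw [PySem.List.mem_combinations_iff]
    exact ⟨List.take_sublist _ _, by simp [hin]⟩
  have hne : (PySem.List.combinations s i).map List.sum ≠ [] := by
    intro hnil
    rw [List.map_eq_nil_iff] at hnil
    simp [hnil] at hwit
  obtain ⟨hmem, hmax⟩ := maxD_spec _ hne
  obtain ⟨c, hc, hcs⟩ := List.mem_map.mp hmem
  obtain ⟨hcsub, hclen⟩ := (PySem.List.mem_combinations_iff _ _ _).mp hc
  have hup : (PySem.List.max? ((PySem.List.combinations s i).map List.sum)
      (fun x => x)).getD 0 ≤ (t.drop (t.length - i)).sum := by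
    have := sum_le_drop t hp c (hcsub.subperm.trans ht.symm.subperm)
    rw [hclen] at this
    omega
  have hlo : (t.drop (t.length - i)).sum ≤ (PySem.List.max?
      ((PySem.List.combinations s i).map List.sum) (fun x => x)).getD 0 := by
    obtain ⟨d, hdp, hds⟩ := (List.drop_sublist (t.length - i) t).subperm.trans ht.subperm
    have hd : d ∈ PySem.List.combinations s i := by
      rw [PySem.List.mem_combinations_iff]
      exact ⟨hds, by rw [hdp.length_eq, List.length_drop]; omega⟩
    have : d.sum ∈ (PySem.List.combinations s i).map List.sum := List.mem_map_of_mem hd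
    have := hmax _ this
    rw [hdp.sum_eq] at this
    omega
  omega

-- crux 2: the aggregate monotonicity check over the table equals B's closed-form
-- loop on the sorted list, which carries lo = Σ(i smallest) and hi = Σ(i largest)
lemma bridge (s t : List Int) (ht : t.Perm s) (hp : t.Pairwise (· ≤ ·)) (k : Nat) :
    ∀ i : Nat, 2 ≤ i → i + k = s.length →
    sMono ((t.drop (t.length - (i - 1))).sum)
        ((PySem.List.pyRange (i : Int) (s.length : Int)).map
          (fun j => (PySem.List.combinations s j.toNat).map List.sum))
      = bMono t (s.length : Int) ((t.drop (t.length - (i - 1))).sum)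
          ((t.take i).sum) ((t.drop (t.length - i)).sum)
          (PySem.List.pyRange (i : Int) (s.length : Int)) := by
  have hlen : t.length = s.length := ht.length_eq
  induction k with
  | zero =>
    intro i hi2 hik
    rw [PySem.List.pyRange_one_eq_nil (by omega)]
    rfl
  | succ k ihk =>
    intro i hi2 hik
    have hiltn : i < s.length := by omega
    rw [PySem.List.pyRange_one_cons (by exact_mod_cast hiltn)]
    simp only [List.map_cons, sMono, bMono, Int.toNat_natCast]
    rw [minD_comb s t ht hp i (by omega)]
    by_cases hc : (t.take i).sum ≤ (t.drop (t.length - (i - 1))).sum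
    · rw [if_pos hc, if_pos hc]
    · rw [if_neg hc, if_neg hc]
      rw [maxD_comb s t ht hp i (by omega)]
      have hg1 : PySem.List.pyGet? t (i : Int) = some (t[i]'(by omega)) := by
        rw [PySem.List.pyGet?_natCast, List.getElem?_eq_getElem]
      have hcast : (s.length : Int) - (i : Int) - 1 = ((t.length - i - 1 : Nat) : Int) := by
        omega
      have hg2 : PySem.List.pyGet? t ((s.length : Int) - (i : Int) - 1)
          = some (t[t.length - i - 1]'(by omega)) := by
        rw [hcast, PySem.List.pyGet?_natCast, List.getElem?_eq_getElem]
      rw [hg1, hg2]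
      simp only [Option.getD_some]
      have hlo : (t.take i).sum + t[i]'(by omega) = (t.take (i + 1)).sum :=
        (List.sum_take_succ t i (by omega)).symm
      have hdropstep : (t.drop (t.length - i - 1)).sum
          = t[t.length - i - 1]'(by omega) + (t.drop (t.length - i)).sum := by
        rw [List.drop_eq_getElem_cons (l := t) (i := t.length - i - 1) (by omega)]
        have : t.length - i - 1 + 1 = t.length - i := by omega
        rw [this, List.sum_cons]
      have hihcall := ihk (i + 1) (by omega) (by omega)
      have e1 : t.length - (i + 1 - 1) = t.length - i := by omega
      have e2 : t.length - (i + 1) = t.length - i - 1 := by omega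
      rw [e1, e2] at hihcall
      have e3 : ((i : Int) + 1) = ((i + 1 : Nat) : Int) := by omega
      rw [e3, hihcall, hlo, hdropstep]
      ring_nf

-- Python's negative indexing, in range: t[j] for -len ≤ j < 0
lemma pyGet_neg (l : List Int) (j : Int) (h1 : -(l.length : Int) ≤ j) (h2 : j < 0) :
    PySem.List.pyGet? l j = some (l[l.length - (-j).toNat]'(by omega)) := by
  simp only [PySem.List.pyGet?, PySem.List.pyIdx?]
  rw [if_neg (by omega), if_pos h1]
  exact List.getElem?_eq_getElem (by omega)

-- the maximum of a sorted nonempty list is its last element, i.e. Σ of the last 1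
lemma maxD_sorted (t : List Int) (hp : t.Pairwise (· ≤ ·)) (hne : t ≠ []) :
    (PySem.List.max? t (fun x => x)).getD 0 = (t.drop (t.length - 1)).sum := by
  obtain ⟨hmem, hmax⟩ := maxD_spec t hne
  have hlpos : 0 < t.length := List.length_pos_of_ne_nil hne
  have hdrop : t.drop (t.length - 1) = [t[t.length - 1]'(by omega)] := by
    rw [List.drop_eq_getElem_cons (by omega)]
    have : t.length - 1 + 1 = t.length := by omega
    rw [this, List.drop_length]
  have hlastmem : t[t.length - 1]'(by omega) ∈ t := List.getElem_mem _
  have h1 := hmax _ hlastmem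
  obtain ⟨j, hj, hje⟩ := List.mem_iff_getElem.mp hmem
  have h2 : (PySem.List.max? t (fun x => x)).getD 0 ≤ t[t.length - 1]'(by omega) := by
    rcases Nat.lt_or_ge j (t.length - 1) with hjl | hjl
    · have := List.pairwise_iff_getElem.mp hp j (t.length - 1) hj (by omega) hjl
      omega
    · have : j = t.length - 1 := by omega
      subst this
      omega
  rw [hdrop, List.sum_cons, List.sum_nil]
  omega

-- ===== VERDICT (by name: the statement is the Claim_ definition above) =====
theorem isSpeciaSumSet_spec : Claim_equal_isSpeciaSumSet := by
  intro s _
  unfold Spec_isSpeciaSumSet isSpeciaSumSet isSpeciaSumSet_alt bSorted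
  by_cases h3 : s.length < 3
  · rw [if_pos h3, PySem.List.pyRange_one_eq_nil (by omega)]
    rfl
  · rw [if_neg h3]
    have hsne : s ≠ [] := by intro h; simp [h] at h3
    have hone : PySem.Set.ofList s ≠ [] := by
      match s, hsne with
      | x :: t, _ =>
        intro hc
        have : x ∈ PySem.Set.ofList (x :: t) := (PySem.Set.mem_ofList _ _).mpr List.mem_cons_self
        simp [hc] at this
    have hcne : ∀ i ∈ PySem.List.pyRange 2 (s.length : Int),
        (PySem.List.combinations s i.toNat).map List.sum ≠ [] := by
      intro i hi
      obtain ⟨h2i, hilt⟩ := PySem.List.mem_pyRange_one.mp hi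
      have hle : i.toNat ≤ s.length := by omega
      have : s.take i.toNat ∈ PySem.List.combinations s i.toNat := by
        rw [PySem.List.mem_combinations_iff]
        exact ⟨List.take_sublist _ _, by simp [hle]⟩
      intro hnil
      rw [List.map_eq_nil_iff] at hnil
      simp [hnil] at this
    set t := PySem.List.sorted s (fun x => x) false with htdef
    have ht : t.Perm s := PySem.List.sorted_perm s (fun x => x) false
    have hp : t.Pairwise (· ≤ ·) := PySem.List.sorted_pairwise s (fun x => x)
    have hlen : t.length = s.length := ht.length_eq
    have htne : t ≠ [] := by
      intro hc; rw [hc] at hlen; simp at hlen; omega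
    -- A's side: crux 1
    rw [loop_eq s _ _ (PySem.Set.nodup_ofList s) hone hcne]
    -- the running max at entry is the largest element = Σ of the last 1 of t
    have hmax0 : (PySem.List.max? (PySem.Set.ofList s) (fun x => x)).getD 0
        = (t.drop (t.length - 1)).sum := by
      rw [maxD_congr _ t hone htne
        (fun x => (PySem.Set.mem_ofList s x).trans (ht.mem_iff).symm)]
      exact maxD_sorted t hp htne
    -- crux 2 at i = 2
    have hbridge := bridge s t ht hp (s.length - 2) 2 (by omega) (by omega)
    have h21 : (2 : Nat) - 1 = 1 := rfl
    rw [h21] at hbridge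
    -- B's initial literals
    have hg1 : (PySem.List.pyGet? t (-1)).getD 0 + (PySem.List.pyGet? t (-2)).getD 0
        = (t.drop (t.length - 2)).sum := by
      have hd2 : t.drop (t.length - 2) = t[t.length - 2]'(by omega)
          :: t[t.length - 1]'(by omega) :: [] := by
        rw [List.drop_eq_getElem_cons (by omega)]
        have e : t.length - 2 + 1 = t.length - 1 := by omega
        rw [e, List.drop_eq_getElem_cons (by omega)]
        have e' : t.length - 1 + 1 = t.length := by omega
        rw [e', List.drop_length]
      have hm1 : PySem.List.pyGet? t (-1) = some (t[t.length - 1]'(by omega)) := by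
        rw [pyGet_neg t (-1) (by omega) (by omega)]
        norm_num
      have hm2 : PySem.List.pyGet? t (-2) = some (t[t.length - 2]'(by omega)) := by
        rw [pyGet_neg t (-2) (by omega) (by omega)]
        simp
      rw [hm1, hm2, hd2]
      simp only [Option.getD_some, List.sum_cons, List.sum_nil]
      ring
    have hg0 : (PySem.List.pyGet? t 0).getD 0 + (PySem.List.pyGet? t 1).getD 0
        = (t.take 2).sum := by
      have h0 : PySem.List.pyGet? t (0 : Int) = some (t[0]'(by omega)) := by
        rw [show (0:Int) = ((0:Nat):Int) from rfl, PySem.List.pyGet?_natCast,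
          List.getElem?_eq_getElem (by omega)]
      have h1 : PySem.List.pyGet? t (1 : Int) = some (t[1]'(by omega)) := by
        rw [show (1:Int) = ((1:Nat):Int) from rfl, PySem.List.pyGet?_natCast,
          List.getElem?_eq_getElem (by omega)]
      have ht2 : (t.take 2).sum = (t.take 1).sum + t[1]'(by omega) :=
        List.sum_take_succ t 1 (by omega)
      have ht1 : (t.take 1).sum = (t.take 0).sum + t[0]'(by omega) :=
        List.sum_take_succ t 0 (by omega)
      rw [h0, h1]
      simp only [Option.getD_some, List.take_zero, List.sum_nil] at *
      omega
    have hm1' : (PySem.List.pyGet? t (-1)).getD 0 = (t.drop (t.length - 1)).sum := by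
      have hm1 : PySem.List.pyGet? t (-1) = some (t[t.length - 1]'(by omega)) := by
        rw [pyGet_neg t (-1) (by omega) (by omega)]
        norm_num
      have hdrop : t.drop (t.length - 1) = [t[t.length - 1]'(by omega)] := by
        rw [List.drop_eq_getElem_cons (by omega)]
        have : t.length - 1 + 1 = t.length := by omega
        rw [this, List.drop_length]
      rw [hm1, hdrop]
      simp
    rw [hmax0, hg0, hg1, hm1']
    rw [show ((2:Nat) : Int) = (2 : Int) from rfl] at hbridge
    rw [hbridge]
    -- both sides now branch on the same bMono value
    cases hbm : bMono t (s.length : Int) ((t.drop (t.length - 1)).sum)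
        ((t.take 2).sum) ((t.drop (t.length - 2)).sum)
        (PySem.List.pyRange 2 (s.length : Int)) with
    | false => simp
    | true =>
      simp only [Bool.true_and, Bool.not_true, Bool.false_eq_true, if_false]
      have hbp : ((PySem.List.pyRange 2 (s.length : Int)).map
            (fun i => (PySem.List.combinations s i.toNat).map List.sum)).foldl
            (fun pool sums => pool ++ sums) (PySem.Set.ofList s) = bPool s := by
        rw [List.foldl_map]
        rfl
      rw [hbp, poolCheck_eq_nodup]
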